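-- pv_equiv track=rewrite | github.com/dpeck12/Alg_DS_December | min-max-sum.py | calc_sum_recursive
-- ===== SOURCE A (Python) =====
-- def calc_sum_recursive(
--     arr,
--     count,
--     start = 0,
--     current_sum = 0
-- ):
--     if count == 0:
--         return [current_sum]
--
--     results = []
--     for i in range(start, len(arr)):
--             results.extend(
--                 calc_sum_recursive(
--                     arr,
--                     count - 1,
--                     i + 1,
--                     arr[i] + current_sum
--                 )
--             )
--     return results
-- ===== SOURCE B (Python) =====
-- def _combinations(lst, k):
--     if k < 0:
--         return []
--     if k == 0:
--         return [[]]
--     if not lst: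
--         return []
--     first, rest = lst[0], lst[1:]
--     with_first = [[first] + c for c in _combinations(rest, k - 1)]
--     return with_first + _combinations(rest, k)
--
-- def calc_sum_recursive(arr, count, start=0, current_sum=0):
--     window = [arr[i] for i in range(start, len(arr))]
--     return [current_sum + sum(c) for c in _combinations(window, count)]
-- ===== Notes on version B (the rewrite author's own statement) =====
-- stated objective: alternative
-- what changed: B is staged instead of accumulating: it first materialises the window of elements A enumerates ([arr[i] for i in range(start, len(arr))]), then a structural take/skip helper generates the count-element combinations of that window as lists, and the result is one comprehension mapping current_sum + sum(c) over them; A instead recurses over index ranges, threading a partial sum and extending an accumulator list.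
-- outside the precondition, e.g. on calc_sum_recursive([], 0, -1, 0): A returns [0], B raises IndexError; on calc_sum_recursive([1], 0, -3, 5): A returns [5], B raises IndexError
import Mathlib
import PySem

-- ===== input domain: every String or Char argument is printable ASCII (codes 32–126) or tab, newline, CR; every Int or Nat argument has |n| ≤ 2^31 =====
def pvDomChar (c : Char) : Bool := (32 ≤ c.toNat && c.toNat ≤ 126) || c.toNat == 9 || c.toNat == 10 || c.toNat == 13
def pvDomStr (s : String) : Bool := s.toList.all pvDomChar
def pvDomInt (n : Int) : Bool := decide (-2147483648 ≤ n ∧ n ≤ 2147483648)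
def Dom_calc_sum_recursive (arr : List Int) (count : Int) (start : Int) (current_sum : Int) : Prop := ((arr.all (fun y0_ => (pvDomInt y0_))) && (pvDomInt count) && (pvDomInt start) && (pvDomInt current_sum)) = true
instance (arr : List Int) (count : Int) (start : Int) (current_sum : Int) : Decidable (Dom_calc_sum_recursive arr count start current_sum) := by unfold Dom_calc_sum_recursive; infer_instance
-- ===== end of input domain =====

-- B stages the work: materialise the window of elements A enumerates, generate its
-- combinations as lists by take/skip recursion, then map current_sum + sum over them;
-- A threads a partial sum through an index recursion with an accumulator.

-- ===== PORT A =====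
-- arr[i] is ported as (pyGet? arr i).getD 0: inside Pre_ every access is in range,
-- so the default is never taken; the out-of-range (IndexError) inputs are excluded by Pre_.
def calc_sum_recursive (arr : List Int) (count : Int) (start : Int) (current_sum : Int) : List Int :=
  if count = 0 then [current_sum]
  else
    (PySem.List.pyRange start arr.length 1).attach.foldl
      (fun results i =>
        results ++ calc_sum_recursive arr (count - 1) (i.1 + 1)
          ((PySem.List.pyGet? arr i.1).getD 0 + current_sum))
      []
termination_by ((arr.length : Int) + 1 - start).toNat
decreasing_by
  have h := PySem.List.mem_pyRange_one.mp i.2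
  omega

-- ===== PORT B =====
-- helper _combinations of Source B: the k-element combinations of lst, lexicographic order
def pvCombinations (lst : List Int) (k : Int) : List (List Int) :=
  if k < 0 then []
  else if k = 0 then [[]]
  else
    match lst with
    | [] => []
    | x :: rest =>
      (pvCombinations rest (k - 1)).map (fun c => x :: c) ++ pvCombinations rest k

-- the window [arr[i] for i in range(start, len(arr))]; arr[i] as (pyGet? arr i).getD 0,
-- exact inside Pre_ (every access in range there)
def calc_sum_recursive_alt (arr : List Int) (count : Int) (start : Int) (current_sum : Int) : List Int :=
  (pvCombinations
      ((PySem.List.pyRange start arr.length 1).map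
        (fun i => (PySem.List.pyGet? arr i).getD 0))
      count).map
    (fun c => current_sum + c.sum)

-- ===== PRECONDITION & SPEC =====
-- Pre_ excludes exactly the inputs with start < -len(arr): there Python A raises
-- IndexError whenever count ≠ 0, and B's window comprehension raises IndexError even
-- for count == 0 (A returns [current_sum] there only by short-circuiting before
-- touching arr, so B itself raises on those inputs).
def Pre_calc_sum_recursive (arr : List Int) (count : Int) (start : Int) (current_sum : Int) : Prop :=
  -(arr.length : Int) ≤ start
instance (arr : List Int) (count : Int) (start : Int) (current_sum : Int) : Decidable (Pre_calc_sum_recursive arr count start current_sum) := by unfold Pre_calc_sum_recursive; infer_instance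

def pvWitness_calc_sum_recursive : List Int × Int × Int × Int := ([1, 2, 3], 2, 0, 0)

def Spec_calc_sum_recursive (arr : List Int) (count : Int) (start : Int) (current_sum : Int) (out : List Int) : Prop := out = calc_sum_recursive_alt arr count start current_sum
instance (arr : List Int) (count : Int) (start : Int) (current_sum : Int) (out : List Int) : Decidable (Spec_calc_sum_recursive arr count start current_sum out) := by unfold Spec_calc_sum_recursive; infer_instance

-- ===== CLAIM (what is proved, stated in full; the proofs are below) =====
def Claim_equal_calc_sum_recursive : Prop := ∀ (arr : List Int) (count : Int) (start : Int) (current_sum : Int), Dom_calc_sum_recursive arr count start current_sum → Pre_calc_sum_recursive arr count start current_sum → Spec_calc_sum_recursive arr count start current_sum (calc_sum_recursive arr count start current_sum)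

-- ===== LEMMAS AND PROOFS =====

-- A's loop, written as a flatMap over the index range.
theorem calc_sum_recursive_flat (arr : List Int) (count : Int) (start : Int) (current_sum : Int)
    (h0 : count ≠ 0) :
    calc_sum_recursive arr count start current_sum =
      (PySem.List.pyRange start arr.length 1).flatMap
        (fun i => calc_sum_recursive arr (count - 1) (i + 1)
          ((PySem.List.pyGet? arr i).getD 0 + current_sum)) := by
  rw [calc_sum_recursive]
  simp [h0, List.flatMap_def]

theorem calc_sum_recursive_nil (arr : List Int) (count : Int) (start : Int) (current_sum : Int)
    (h0 : count ≠ 0) (h : (arr.length : Int) ≤ start) :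
    calc_sum_recursive arr count start current_sum = [] := by
  rw [calc_sum_recursive_flat arr count start current_sum h0,
    PySem.List.pyRange_one_eq_nil h]
  rfl

theorem calc_sum_recursive_cons (arr : List Int) (count : Int) (start : Int) (current_sum : Int)
    (h0 : count ≠ 0) (h : start < (arr.length : Int)) :
    calc_sum_recursive arr count start current_sum =
      calc_sum_recursive arr (count - 1) (start + 1)
        ((PySem.List.pyGet? arr start).getD 0 + current_sum)
      ++ calc_sum_recursive arr count (start + 1) current_sum := by
  rw [calc_sum_recursive_flat arr count start current_sum h0,
    calc_sum_recursive_flat arr count (start + 1) current_sum h0,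
    PySem.List.pyRange_one_cons h, List.flatMap_cons]

-- a negative count never reaches 0: A returns []
theorem calc_sum_recursive_neg (arr : List Int) (count : Int) (start : Int) (current_sum : Int)
    (h0 : count < 0) :
    calc_sum_recursive arr count start current_sum = [] := by
  by_cases hl : (arr.length : Int) ≤ start
  · exact calc_sum_recursive_nil arr count start current_sum (by omega) hl
  · rw [calc_sum_recursive_cons arr count start current_sum (by omega) (by omega),
      calc_sum_recursive_neg arr (count - 1) (start + 1) _ (by omega),
      calc_sum_recursive_neg arr count (start + 1) current_sum h0]
    rfl
termination_by ((arr.length : Int) + 1 - start).toNat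
decreasing_by all_goals omega

theorem pvCombinations_neg (lst : List Int) (k : Int) (h : k < 0) :
    pvCombinations lst k = [] := by
  rw [pvCombinations.eq_def]; simp [h]

theorem pvCombinations_zero (lst : List Int) : pvCombinations lst 0 = [[]] := by
  rw [pvCombinations.eq_def]; simp

theorem pvCombinations_nil_pos (k : Int) (h : 0 < k) : pvCombinations [] k = [] := by
  rw [pvCombinations.eq_def]
  simp only [show ¬ k < 0 by omega, show ¬ k = 0 by omega, if_false]

theorem pvCombinations_pos (x : Int) (rest : List Int) (k : Int) (h : 0 < k) :
    pvCombinations (x :: rest) k =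
      (pvCombinations rest (k - 1)).map (fun c => x :: c) ++ pvCombinations rest k := by
  rw [pvCombinations.eq_def]
  simp only [show ¬ k < 0 by omega, show ¬ k = 0 by omega, if_false]

-- A equals the combination sums of the window it enumerates, for every start and count
theorem calc_sum_recursive_eq_window (arr : List Int) (count : Int) (start : Int)
    (current_sum : Int) :
    calc_sum_recursive arr count start current_sum =
      (pvCombinations
          ((PySem.List.pyRange start arr.length 1).map
            (fun i => (PySem.List.pyGet? arr i).getD 0))
          count).map
        (fun c => current_sum + c.sum) := by
  by_cases hneg : count < 0
  · rw [calc_sum_recursive_neg arr count start current_sum hneg, pvCombinations_neg _ _ hneg]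
    rfl
  · by_cases h0 : count = 0
    · subst h0
      rw [calc_sum_recursive, pvCombinations_zero]
      simp
    · by_cases hl : (arr.length : Int) ≤ start
      · rw [calc_sum_recursive_nil arr count start current_sum h0 hl,
          PySem.List.pyRange_one_eq_nil hl]
        rw [show (([] : List Int).map (fun i => (PySem.List.pyGet? arr i).getD 0)) = [] from rfl,
          pvCombinations_nil_pos count (by omega)]
        rfl
      · rw [calc_sum_recursive_cons arr count start current_sum h0 (by omega),
          calc_sum_recursive_eq_window arr (count - 1) (start + 1),
          calc_sum_recursive_eq_window arr count (start + 1),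
          PySem.List.pyRange_one_cons (show start < (arr.length : Int) by omega),
          List.map_cons, pvCombinations_pos _ _ count (by omega),
          List.map_append, List.map_map]
        congr 1
        apply List.map_congr_left
        intro c _
        simp only [Function.comp_apply, List.sum_cons]
        ring
termination_by ((arr.length : Int) + 1 - start).toNat
decreasing_by all_goals omega

-- ===== VERDICT (by name: the statement is the Claim_ definition above) =====
theorem calc_sum_recursive_spec : Claim_equal_calc_sum_recursive := by
  intro arr count start current_sum _ _
  exact calc_sum_recursive_eq_window arr count start current_sum
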